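-- pv_equiv track=rewrite | github.com/mail2vimal11-arch/Vedic | parashari_engine.py | _d30_sign
-- ===== SOURCE A (Python) =====
-- def _d30_sign(si, d):
--     """D30 Trimsamsha."""
--     odd_cutoffs  = [(5, 0), (10, 9), (18, 8), (25, 2), (30, 6)]
--     even_cutoffs = [(5, 6), (12, 2), (20, 8), (25, 9), (30, 0)]
--     cutoffs = odd_cutoffs if si % 2 == 0 else even_cutoffs
--     for limit, s_idx in cutoffs:
--         if d < limit:
--             return s_idx
--     return 0
-- ===== SOURCE B (Python) =====
-- def _d30_sign(si, d):
--     """D30 Trimsamsha via binary search (bisect_right) over boundary/result arrays."""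
--     if si % 2 == 0:
--         bounds, results = [5, 10, 18, 25, 30], [0, 9, 8, 2, 6]
--     else:
--         bounds, results = [5, 12, 20, 25, 30], [6, 2, 8, 9, 0]
--     lo, hi = 0, 5
--     while lo < hi:  # bisect_right: first index with d < bounds[index]
--         mid = (lo + hi) // 2
--         if d < bounds[mid]:
--             hi = mid
--         else:
--             lo = mid + 1
--     return results[lo] if lo < 5 else 0
-- ===== Notes on version B (the rewrite author's own statement) =====
-- stated objective: alternative
-- what changed: Replaces the linear scan over (limit, sign) pairs by a hand-written binary search (bisect_right) over a sorted boundary array with a parallel result array, indexing the result once.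
import Mathlib
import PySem

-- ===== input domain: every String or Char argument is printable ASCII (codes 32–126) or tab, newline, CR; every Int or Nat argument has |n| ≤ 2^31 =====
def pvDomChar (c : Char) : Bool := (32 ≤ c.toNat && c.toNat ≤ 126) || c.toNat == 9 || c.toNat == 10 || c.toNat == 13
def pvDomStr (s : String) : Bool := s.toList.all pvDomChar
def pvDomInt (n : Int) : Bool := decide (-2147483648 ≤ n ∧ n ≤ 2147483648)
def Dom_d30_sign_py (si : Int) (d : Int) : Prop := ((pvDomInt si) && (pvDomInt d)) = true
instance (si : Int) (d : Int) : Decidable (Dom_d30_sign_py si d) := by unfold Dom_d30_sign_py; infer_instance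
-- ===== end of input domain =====

-- B replaces A's linear cutoff scan by a binary search (bisect_right) over sorted
-- boundary arrays with a parallel result array (alternative decomposition, same cost at k=5).


-- ===== PORT A =====
-- 'for limit, s_idx in cutoffs: if d < limit: return s_idx' / fall-through 'return 0'
def d30_scanA : List (Int × Int) → Int → Int
  | [], _ => 0
  | (limit, s_idx) :: rest, d => if d < limit then s_idx else d30_scanA rest d

def d30_sign_py (si : Int) (d : Int) : Int :=
  let odd_cutoffs : List (Int × Int) := [(5, 0), (10, 9), (18, 8), (25, 2), (30, 6)]
  let even_cutoffs : List (Int × Int) := [(5, 6), (12, 2), (20, 8), (25, 9), (30, 0)]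
  let cutoffs := if PySem.Int.mod si 2 = 0 then odd_cutoffs else even_cutoffs
  d30_scanA cutoffs d

-- ===== PORT B =====
-- the hand-written bisect_right loop of Source B; indices stay in range so getD is exact
def d30_bsr (bounds : List Int) (d : Int) : Nat → Nat → Nat
  | lo, hi =>
    if h : lo < hi then
      let mid := (lo + hi) / 2
      if d < bounds.getD mid 0 then d30_bsr bounds d lo mid
      else d30_bsr bounds d (mid + 1) hi
    else lo
  termination_by lo hi => hi - lo
  decreasing_by all_goals omega

def d30_sign_py_alt (si : Int) (d : Int) : Int :=
  let p : List Int × List Int :=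
    if PySem.Int.mod si 2 = 0 then ([5, 10, 18, 25, 30], [0, 9, 8, 2, 6])
    else ([5, 12, 20, 25, 30], [6, 2, 8, 9, 0])
  let lo := d30_bsr p.1 d 0 5
  if lo < 5 then p.2.getD lo 0 else 0

-- ===== PRECONDITION & SPEC =====
def Spec_d30_sign_py (si : Int) (d : Int) (out : Int) : Prop := out = d30_sign_py_alt si d
instance (si : Int) (d : Int) (out : Int) : Decidable (Spec_d30_sign_py si d out) := by unfold Spec_d30_sign_py; infer_instance

-- ===== CLAIM (what is proved, stated in full; the proofs are below) =====
def Claim_equal_d30_sign_py : Prop := ∀ (si : Int) (d : Int), Dom_d30_sign_py si d → Spec_d30_sign_py si d (d30_sign_py si d)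

-- ===== LEMMAS AND PROOFS =====

-- ===== VERDICT (by name: the statement is the Claim_ definition above) =====
theorem d30_sign_py_spec : Claim_equal_d30_sign_py := by
  intro si d _
  unfold Spec_d30_sign_py d30_sign_py d30_sign_py_alt
  by_cases h : PySem.Int.mod si 2 = 0 <;>
    simp only [h, if_true, if_false] <;>
    by_cases h5 : d < 5 <;> by_cases h10 : d < 10 <;> by_cases h12 : d < 12 <;>
    by_cases h18 : d < 18 <;> by_cases h20 : d < 20 <;> by_cases h25 : d < 25 <;>
    by_cases h30 : d < 30 <;>
    first
    | omega
    | simp [d30_scanA, d30_bsr.eq_def, h5, h10, h12, h18, h20, h25, h30]
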